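-- pv_equiv track=rewrite | github.com/FECT-Dev/meteo-weather-bot-test | update_weather_summary.py | meteorological_block
-- ===== SOURCE A (Python) =====
-- def meteorological_block(text: str) -> str:
--     """Extract only the Meteorological Stations table block."""
--     low = text.lower()
--     start = low.find("meteorological stations")
--     if start == -1:
--         start = 0
--     stops = []
--     for marker in ["hydro catchment areas", "rainfall stations", "other rainfall stations"]:
--         p = low.find(marker, start + 1)
--         if p != -1:
--             stops.append(p)
--     end = min(stops) if stops else len(text)
--     return text[start:end]
-- ===== SOURCE B (Python) =====
-- def meteorological_block(text: str) -> str: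
--     """Extract only the Meteorological Stations table block."""
--     low = text.lower()
--     start = low.find("meteorological stations")
--     if start == -1:
--         start = 0
--     markers = ("hydro catchment areas", "rainfall stations", "other rainfall stations")
--     end = len(text)
--     for i in range(start + 1, len(text)):
--         if any(low.startswith(m, i) for m in markers):
--             end = i
--             break
--     return text[start:end]
-- ===== Notes on version B (the rewrite author's own statement) =====
-- stated objective: alternative
-- what changed: A runs three separate find() scans (one per stop marker) and takes the min of the hits; B makes a single left-to-right scan from start+1 and stops at the first position where any of the three markers begins.
import Mathlib
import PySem

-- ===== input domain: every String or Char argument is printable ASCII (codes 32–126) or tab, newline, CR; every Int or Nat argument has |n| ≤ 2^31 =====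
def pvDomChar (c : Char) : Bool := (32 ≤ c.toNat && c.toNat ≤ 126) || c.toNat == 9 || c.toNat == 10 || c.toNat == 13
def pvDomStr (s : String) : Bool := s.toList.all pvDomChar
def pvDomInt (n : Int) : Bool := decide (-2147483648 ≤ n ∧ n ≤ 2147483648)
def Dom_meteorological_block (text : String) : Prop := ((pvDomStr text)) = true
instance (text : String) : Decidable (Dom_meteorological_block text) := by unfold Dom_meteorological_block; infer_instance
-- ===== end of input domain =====

-- B replaces the three-separate-finds-plus-min of A by a single left-to-right scan that stops at the
-- first position where any stop marker begins (objective: alternative single-pass decomposition).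

-- ===== PORT A =====
def meteorological_block (text : String) : String :=
  let low := PySem.Str.lower text
  let start0 := PySem.Str.find low "meteorological stations"
  let start : Int := if start0 = -1 then 0 else start0
  let stops : List Int :=
    ["hydro catchment areas", "rainfall stations", "other rainfall stations"].foldl
      (fun acc marker =>
        let p := PySem.Str.findFrom low marker (start + 1) none
        if p ≠ -1 then acc ++ [p] else acc) []
  -- min(stops) if stops else len(text)
  let endv : Int := (PySem.List.min? stops (fun x => x)).getD (PySem.Str.len text)
  PySem.Str.slice text (some start) (some endv)

-- ===== PORT B =====
def pvM1 : List Char := "hydro catchment areas".toList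
def pvM2 : List Char := "rainfall stations".toList
def pvM3 : List Char := "other rainfall stations".toList

-- any(low.startswith(m, i) for m in markers); startswith with start index i ≥ 0 is
-- exactly prefix-at-i, ported as startswith on (low.drop i).
def pvAnyMarker (low : List Char) (i : Nat) : Bool :=
  [pvM1, pvM2, pvM3].any (fun m => PySem.Chars.startswith (low.drop i) m)

-- the for-loop over range(start+1, len(text)) with break: first i in [k, n) where a marker starts
def pvScan (low : List Char) (k n : Nat) : Option Nat :=
  if h : k < n then
    if pvAnyMarker low k then some k else pvScan low (k + 1) n
  else none
termination_by n - k

def meteorological_block_alt (text : String) : String :=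
  let low := PySem.Str.lower text
  let start0 := PySem.Str.find low "meteorological stations"
  let start : Int := if start0 = -1 then 0 else start0
  -- end = len(text) unless the scan broke at some i
  let endv : Int :=
    ((pvScan low.toList (start.toNat + 1) text.toList.length).map (fun i => (i : Int))).getD
      (PySem.Str.len text)
  PySem.Str.slice text (some start) (some endv)

-- ===== PRECONDITION & SPEC =====
def Spec_meteorological_block (text : String) (out : String) : Prop := out = meteorological_block_alt text
instance (text : String) (out : String) : Decidable (Spec_meteorological_block text out) := by unfold Spec_meteorological_block; infer_instance

-- ===== CLAIM (what is proved, stated in full; the proofs are below) =====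
def Claim_equal_meteorological_block : Prop := ∀ (text : String), Dom_meteorological_block text → Spec_meteorological_block text (meteorological_block text)

-- ===== LEMMAS AND PROOFS =====


lemma pvScan_none (low : List Char) (k n : Nat) (h : pvScan low k n = none) :
    ∀ i, k ≤ i → i < n → pvAnyMarker low i = false := by
  fun_induction pvScan low k n with
  | case1 k h1 h2 => simp_all
  | case2 k h1 h2 ih =>
    intro i hki hin
    rcases Nat.eq_or_lt_of_le hki with rfl | hlt
    · simpa using h2
    · exact ih h i hlt hin
  | case3 k h1 => intro i hki hin; omega

lemma pvScan_some (low : List Char) (k n j : Nat) (h : pvScan low k n = some j) :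
    k ≤ j ∧ j < n ∧ pvAnyMarker low j = true ∧
      ∀ i, k ≤ i → i < j → pvAnyMarker low i = false := by
  fun_induction pvScan low k n with
  | case1 k h1 h2 =>
    obtain rfl : k = j := by simpa using h
    exact ⟨le_refl _, h1, h2, fun i hki hij => absurd hki (by omega)⟩
  | case2 k h1 h2 ih =>
    obtain ⟨hkj, hjn, hj, hmin⟩ := ih h
    refine ⟨by omega, hjn, hj, fun i hki hij => ?_⟩
    rcases Nat.eq_or_lt_of_le hki with rfl | hlt
    · simpa using h2
    · exact hmin i hlt hij
  | case3 k h1 => simp at h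
lemma findFrom_cases (cs m : List Char) (hm : m ≠ []) (k : Nat) (hk : k ≤ cs.length) :
    (PySem.Chars.findFrom cs m k none = -1 ∧ ∀ i, k ≤ i → ¬ m <+: cs.drop i)
    ∨ (∃ j : Nat, PySem.Chars.findFrom cs m k none = (j : Int) ∧ k ≤ j ∧ j < cs.length ∧
        m <+: cs.drop j ∧ ∀ i, k ≤ i → i < j → ¬ m <+: cs.drop i) := by
  by_cases h : PySem.Chars.findFrom cs m (k : Int) none = -1
  · left
    refine ⟨h, fun i hki hpre => ?_⟩
    rw [PySem.Chars.findFrom_natCast_eq_neg_one_iff cs m k hk] at h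
    apply h
    have hdd : cs.drop i = (cs.drop k).drop (i - k) := by
      rw [List.drop_drop]; congr 1; omega
    rw [hdd] at hpre
    exact hpre.isInfix.trans (List.drop_suffix _ _).isInfix
  · right
    obtain ⟨hle, hpre, hmin⟩ := PySem.Chars.findFrom_natCast_spec cs m k hk h
    refine ⟨(PySem.Chars.findFrom cs m (k : Int) none).toNat, ?_, ?_, ?_, hpre, hmin⟩
    · omega
    · omega
    · by_contra hlen
      push Not at hlen
      rw [List.drop_eq_nil_of_le (by omega)] at hpre
      exact hm (List.prefix_nil.mp hpre)

lemma anyMarker_iff (cs : List Char) (i : Nat) :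
    pvAnyMarker cs i = true ↔ pvM1 <+: cs.drop i ∨ pvM2 <+: cs.drop i ∨ pvM3 <+: cs.drop i := by
  simp [pvAnyMarker, PySem.Chars.startswith_iff]

lemma anyMarker_of_prefix {cs M : List Char} {i : Nat} (hM : M ∈ [pvM1, pvM2, pvM3])
    (h : M <+: cs.drop i) : pvAnyMarker cs i = true := by
  rw [anyMarker_iff]
  simp only [List.mem_cons, List.not_mem_nil, or_false] at hM
  rcases hM with rfl | rfl | rfl
  · exact Or.inl h
  · exact Or.inr (Or.inl h)
  · exact Or.inr (Or.inr h)

lemma pvMarker_none (cs : List Char) (k : Nat) (hk : k ≤ cs.length)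
    (hs : pvScan cs k cs.length = none) (M : List Char) (hM : M ∈ [pvM1, pvM2, pvM3])
    (hne : M ≠ []) : PySem.Chars.findFrom cs M (k : Int) none = -1 := by
  rcases findFrom_cases cs M hne k hk with ⟨h, _⟩ | ⟨j', _, hkj, hjl, hpre, _⟩
  · exact h
  · have := pvScan_none cs k cs.length hs j' hkj hjl
    rw [anyMarker_of_prefix hM hpre] at this
    exact absurd this (by simp)

lemma pvMarker_ge (cs : List Char) (k j : Nat) (hk : k ≤ cs.length)
    (hs : pvScan cs k cs.length = some j) (M : List Char) (hM : M ∈ [pvM1, pvM2, pvM3])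
    (hne : M ≠ []) :
    PySem.Chars.findFrom cs M (k : Int) none = -1 ∨
      (j : Int) ≤ PySem.Chars.findFrom cs M (k : Int) none := by
  rcases findFrom_cases cs M hne k hk with ⟨h, _⟩ | ⟨j', he, hkj, hjl, hpre, _⟩
  · exact Or.inl h
  · right
    rw [he]
    obtain ⟨hkj0, hjn, hany, hmin⟩ := pvScan_some cs k cs.length j hs
    by_contra hlt
    have hj' : j' < j := by omega
    have := hmin j' hkj hj'
    rw [anyMarker_of_prefix hM hpre] at this
    exact absurd this (by simp)

lemma pvMarker_eq (cs : List Char) (k j : Nat) (hk : k ≤ cs.length)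
    (hs : pvScan cs k cs.length = some j) (M : List Char) (hM : M ∈ [pvM1, pvM2, pvM3])
    (hne : M ≠ []) (hpre : M <+: cs.drop j) :
    PySem.Chars.findFrom cs M (k : Int) none = (j : Int) := by
  obtain ⟨hkj0, hjn, hany, hmin⟩ := pvScan_some cs k cs.length j hs
  rcases findFrom_cases cs M hne k hk with ⟨h, hnone⟩ | ⟨j', he, hkj, hjl, hpre', hmin'⟩
  · exact absurd hpre (hnone j hkj0)
  · have h1 : ¬ j < j' := fun hlt => (hmin' j hkj0 hlt) hpre
    have h2 : ¬ j' < j := fun hlt => by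
      have := hmin j' hkj hlt
      rw [anyMarker_of_prefix hM hpre'] at this
      exact absurd this (by simp)
    have : j' = j := by omega
    rw [he, this]

lemma pvExists_eq (cs : List Char) (k j : Nat) (hk : k ≤ cs.length)
    (hs : pvScan cs k cs.length = some j) :
    PySem.Chars.findFrom cs pvM1 (k : Int) none = (j : Int) ∨
    PySem.Chars.findFrom cs pvM2 (k : Int) none = (j : Int) ∨
    PySem.Chars.findFrom cs pvM3 (k : Int) none = (j : Int) := by
  obtain ⟨hkj0, hjn, hany, hmin⟩ := pvScan_some cs k cs.length j hs
  rcases (anyMarker_iff cs j).mp hany with h | h | h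
  · exact Or.inl (pvMarker_eq cs k j hk hs pvM1 (by simp) (by decide) h)
  · exact Or.inr (Or.inl (pvMarker_eq cs k j hk hs pvM2 (by simp) (by decide) h))
  · exact Or.inr (Or.inr (pvMarker_eq cs k j hk hs pvM3 (by simp) (by decide) h))

-- A's stop list is empty when every find returned -1
lemma pvMinNone (p1 p2 p3 e : Int) (h1 : p1 = -1) (h2 : p2 = -1) (h3 : p3 = -1) :
    (PySem.List.min?
        (if p3 = -1 then
          if p2 = -1 then
            if p1 = -1 then ([] : List Int) else [p1]
          else
            (if p1 = -1 then ([] : List Int) else [p1]) ++ [p2]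
        else
          (if p2 = -1 then
            if p1 = -1 then ([] : List Int) else [p1]
          else
            (if p1 = -1 then ([] : List Int) else [p1]) ++ [p2]) ++ [p3])
        (fun x => x)).getD e = e := by
  simp [h1, h2, h3, PySem.List.min?]

-- min of the collected stop positions, when each is -1 or ≥ j and one equals j, is j
lemma pvMinSome (p1 p2 p3 e j : Int) (hj : 0 ≤ j)
    (g1 : p1 = -1 ∨ j ≤ p1) (g2 : p2 = -1 ∨ j ≤ p2) (g3 : p3 = -1 ∨ j ≤ p3)
    (hx : p1 = j ∨ p2 = j ∨ p3 = j) :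
    (PySem.List.min?
        (if p3 = -1 then
          if p2 = -1 then
            if p1 = -1 then ([] : List Int) else [p1]
          else
            (if p1 = -1 then ([] : List Int) else [p1]) ++ [p2]
        else
          (if p2 = -1 then
            if p1 = -1 then ([] : List Int) else [p1]
          else
            (if p1 = -1 then ([] : List Int) else [p1]) ++ [p2]) ++ [p3])
        (fun x => x)).getD e = j := by
  by_cases h1 : p1 = -1 <;> by_cases h2 : p2 = -1 <;> by_cases h3 : p3 = -1 <;>
    simp [h1, h2, h3, PySem.List.min?_id_cons, List.foldl] <;> omega

-- ===== VERDICT (by name: the statement is the Claim_ definition above) =====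
theorem meteorological_block_spec : Claim_equal_meteorological_block := by
  intro text _
  unfold Spec_meteorological_block meteorological_block meteorological_block_alt
  simp only [PySem.Str.find_eq, PySem.Str.findFrom_eq, PySem.Str.toList_lower, List.foldl]
  rw [show "hydro catchment areas".toList = pvM1 from rfl,
      show "rainfall stations".toList = pvM2 from rfl,
      show "other rainfall stations".toList = pvM3 from rfl]
  have hlen : (PySem.Chars.lower text.toList).length = text.toList.length := by
    simp [PySem.Chars.lower]
  set cs := PySem.Chars.lower text.toList with hcs
  rw [← hlen]
  have hbr : PySem.Chars.find cs "meteorological stations".toList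
      = PySem.Chars.findFrom cs "meteorological stations".toList ((0 : Nat) : Int) none := by
    simp
  rcases findFrom_cases cs "meteorological stations".toList (by decide) 0 (Nat.zero_le _) with
    ⟨hf, -⟩ | ⟨j0, hf, -, hj0, -, -⟩ <;> rw [hbr] at * <;> rw [hf] <;> norm_num
  · -- "meteorological stations" not found: start = 0, scan starts at 1
    by_cases h0 : cs.length = 0
    · -- empty text: nothing to find, both ends are len(text)
      have hnil : cs = [] := List.length_eq_zero_iff.mp h0
      rw [hnil, pvScan]
      norm_num [show PySem.Chars.findFrom [] pvM1 1 none = -1 from by decide,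
        show PySem.Chars.findFrom [] pvM2 1 none = -1 from by decide,
        show PySem.Chars.findFrom [] pvM3 1 none = -1 from by decide,
        PySem.List.min?]
    · have hk : 1 ≤ cs.length := by omega
      rcases hE : pvScan cs 1 cs.length with - | j
      · have e1 := pvMarker_none cs 1 hk hE pvM1 (by simp) (by decide)
        have e2 := pvMarker_none cs 1 hk hE pvM2 (by simp) (by decide)
        have e3 := pvMarker_none cs 1 hk hE pvM3 (by simp) (by decide)
        norm_num at e1 e2 e3
        rw [pvMinNone _ _ _ _ e1 e2 e3]
        rfl
      · have g1 := pvMarker_ge cs 1 j hk hE pvM1 (by simp) (by decide)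
        have g2 := pvMarker_ge cs 1 j hk hE pvM2 (by simp) (by decide)
        have g3 := pvMarker_ge cs 1 j hk hE pvM3 (by simp) (by decide)
        have hx := pvExists_eq cs 1 j hk hE
        norm_num at g1 g2 g3 hx
        rw [pvMinSome _ _ _ _ (j : Int) (by omega) g1 g2 g3 hx]
        rfl
  · -- found at j0: start = j0, scan starts at j0 + 1
    have hkn : j0 + 1 ≤ cs.length := by omega
    have hne : ¬ ((j0 : Int) = -1) := by omega
    rw [if_neg hne]
    simp only [Int.toNat_natCast]
    have hc : ((j0 : Int) + 1) = ((j0 + 1 : Nat) : Int) := by push_cast; ring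
    rw [hc]
    rcases hE : pvScan cs (j0 + 1) cs.length with - | j
    · have e1 := pvMarker_none cs (j0 + 1) hkn hE pvM1 (by simp) (by decide)
      have e2 := pvMarker_none cs (j0 + 1) hkn hE pvM2 (by simp) (by decide)
      have e3 := pvMarker_none cs (j0 + 1) hkn hE pvM3 (by simp) (by decide)
      rw [pvMinNone _ _ _ _ e1 e2 e3]
      rfl
    · have g1 := pvMarker_ge cs (j0 + 1) j hkn hE pvM1 (by simp) (by decide)
      have g2 := pvMarker_ge cs (j0 + 1) j hkn hE pvM2 (by simp) (by decide)
      have g3 := pvMarker_ge cs (j0 + 1) j hkn hE pvM3 (by simp) (by decide)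
      have hx := pvExists_eq cs (j0 + 1) j hkn hE
      rw [pvMinSome _ _ _ _ (j : Int) (by omega) g1 g2 g3 hx]
      rfl
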